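-- pv_equiv track=rewrite | github.com/VeloF2025/Archon | python/src/agents/ml_models/pattern_prediction_model.py | _assess_complexity_indicators
-- ===== SOURCE A (Python) =====
-- from typing import Dict, List, Optional, Any, Tuple, Set
--
-- def _assess_complexity_indicators(code: str) -> Dict[str, Any]:
--     """Assess complexity indicators in code"""
--     indicators = {
--         "long_methods": 0,
--         "deep_nesting": 0,
--         "long_parameter_lists": 0,
--         "duplicate_code_smell": 0,
--         "large_classes": 0
--     }
--
--     lines = code.split('\n')
--     current_method_length = 0
--     current_class_length = 0
--     max_nesting = 0
--     current_nesting = 0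
--
--     for line in lines:
--         stripped = line.strip()
--
--         # Track method length
--         if stripped.startswith('def '):
--             if current_method_length > 50:
--                 indicators["long_methods"] += 1
--             current_method_length = 0
--         elif current_method_length >= 0:
--             current_method_length += 1
--
--         # Track class length
--         if stripped.startswith('class '):
--             if current_class_length > 300:
--                 indicators["large_classes"] += 1
--             current_class_length = 0
--         elif current_class_length >= 0:
--             current_class_length += 1
--
--         # Track nesting depth
--         indent_level = len(line) - len(line.lstrip())
--         current_nesting = indent_level // 4
--         max_nesting = max(max_nesting, current_nesting)
--
--         # Check parameter lists
--         if 'def ' in line and line.count(',') > 5: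
--             indicators["long_parameter_lists"] += 1
--
--     # Final method/class checks
--     if current_method_length > 50:
--         indicators["long_methods"] += 1
--     if current_class_length > 300:
--         indicators["large_classes"] += 1
--
--     if max_nesting > 4:
--         indicators["deep_nesting"] = max_nesting
--
--     return indicators
-- ===== SOURCE B (Python) =====
-- def _assess_complexity_indicators(code: str):
--     """Assess complexity indicators via a boundary-index decomposition."""
--     lines = code.split('\n')
--     n = len(lines)
--     def_idx = [i for i, l in enumerate(lines) if l.strip().startswith('def ')]
--     class_idx = [i for i, l in enumerate(lines) if l.strip().startswith('class ')]
--
--     def block_count(idx, threshold):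
--         bounds = [-1] + idx + [n]
--         return sum(1 for a, b in zip(bounds, bounds[1:]) if b - a - 1 > threshold)
--
--     max_nesting = max(((len(l) - len(l.lstrip())) // 4 for l in lines), default=0)
--     return {
--         "long_methods": block_count(def_idx, 50),
--         "deep_nesting": max_nesting if max_nesting > 4 else 0,
--         "long_parameter_lists": sum(1 for l in lines if 'def ' in l and l.count(',') > 5),
--         "duplicate_code_smell": 0,
--         "large_classes": block_count(class_idx, 300),
--     }
-- ===== Notes on version B (the rewrite author's own statement) =====
-- stated objective: alternative
-- what changed: Replaces A's single stateful line loop (running method/class length accumulators, running max, in-loop counters) by a boundary-index decomposition: collect the indices of def/class lines once, count over-long gaps between consecutive boundaries via zip over the boundary list, and compute nesting/parameter counts as independent map/max/sum passes.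
import Mathlib
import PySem

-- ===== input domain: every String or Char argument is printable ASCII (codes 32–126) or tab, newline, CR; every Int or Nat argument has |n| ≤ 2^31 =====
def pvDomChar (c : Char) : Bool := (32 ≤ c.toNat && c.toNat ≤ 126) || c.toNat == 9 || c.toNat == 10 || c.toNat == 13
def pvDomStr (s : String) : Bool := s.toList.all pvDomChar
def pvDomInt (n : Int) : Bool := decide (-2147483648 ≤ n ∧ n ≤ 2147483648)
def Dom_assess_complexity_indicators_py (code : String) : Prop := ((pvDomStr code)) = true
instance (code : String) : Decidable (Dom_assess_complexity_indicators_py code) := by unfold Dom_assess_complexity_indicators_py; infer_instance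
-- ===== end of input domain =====

-- B replaces A's single multi-accumulator line loop by a boundary-index decomposition
-- (collect def/class line indices once, count over-long gaps between consecutive boundaries);
-- objective: alternative decomposition, same asymptotic cost.


-- ===== PORT A =====
-- state: (indicators dict, current_method_length, current_class_length, max_nesting)
def aStep (st : PySem.Dict String Int × Int × Int × Int) (line : String) : PySem.Dict String Int × Int × Int × Int :=
  let (ind, cml, ccl, mxn) := st
  let stripped := PySem.Str.strip line
  let (ind, cml) :=
    if PySem.Str.startswith stripped "def " then
      ((if cml > 50 then ind.modify "long_methods" 0 (· + 1) else ind), 0)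
    else if cml ≥ 0 then (ind, cml + 1) else (ind, cml)
  let (ind, ccl) :=
    if PySem.Str.startswith stripped "class " then
      ((if ccl > 300 then ind.modify "large_classes" 0 (· + 1) else ind), 0)
    else if ccl ≥ 0 then (ind, ccl + 1) else (ind, ccl)
  let indent_level := PySem.Str.len line - PySem.Str.len (PySem.Str.lstrip line)
  let current_nesting := PySem.Int.floordiv indent_level 4
  let mxn := max mxn current_nesting
  let ind :=
    if PySem.Str.isIn "def " line ∧ PySem.Str.count line "," > 5 then
      ind.modify "long_parameter_lists" 0 (· + 1)
    else ind
  (ind, cml, ccl, mxn)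

def assess_complexity_indicators_py (code : String) : List (String × Int) :=
  let indicators := PySem.Dict.ofList
    [("long_methods", (0:Int)), ("deep_nesting", 0), ("long_parameter_lists", 0),
     ("duplicate_code_smell", 0), ("large_classes", 0)]
  let lines := (PySem.Str.split? code "\n").getD []   -- sep "\n" ≠ "", so split? is always some
  let st := lines.foldl aStep (indicators, 0, 0, 0)
  let (ind, cml, ccl, mxn) := st
  let ind := if cml > 50 then ind.modify "long_methods" 0 (· + 1) else ind
  let ind := if ccl > 300 then ind.modify "large_classes" 0 (· + 1) else ind
  let ind := if mxn > 4 then ind.insert "deep_nesting" mxn else ind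
  ind.items

-- ===== PORT B =====
def bIsDef (l : String) : Bool := PySem.Str.startswith (PySem.Str.strip l) "def "
def bIsCls (l : String) : Bool := PySem.Str.startswith (PySem.Str.strip l) "class "

def bBlockCount (idx : List Int) (n : Int) (thr : Int) : Int :=
  let bounds := -1 :: idx ++ [n]
  ((bounds.zip (PySem.List.slice bounds (some 1) none)).map
    (fun p => if p.2 - p.1 - 1 > thr then (1:Int) else 0)).sum

def assess_complexity_indicators_py_alt (code : String) : List (String × Int) :=
  let lines := (PySem.Str.split? code "\n").getD []   -- sep "\n" ≠ "", so split? is always some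
  let n : Int := lines.length
  let def_idx := ((PySem.List.enumerate lines).filter (fun p => bIsDef p.2)).map (·.1)
  let class_idx := ((PySem.List.enumerate lines).filter (fun p => bIsCls p.2)).map (·.1)
  let max_nesting := PySem.List.maxD
    (lines.map (fun l => PySem.Int.floordiv (PySem.Str.len l - PySem.Str.len (PySem.Str.lstrip l)) 4))
    (fun x => x) 0
  [("long_methods", bBlockCount def_idx n 50),
   ("deep_nesting", if max_nesting > 4 then max_nesting else 0),
   ("long_parameter_lists",
     (lines.map (fun l => if PySem.Str.isIn "def " l ∧ PySem.Str.count l "," > 5 then (1:Int) else 0)).sum),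
   ("duplicate_code_smell", 0),
   ("large_classes", bBlockCount class_idx n 300)]

-- ===== PRECONDITION & SPEC =====
def Spec_assess_complexity_indicators_py (code : String) (out : List (String × Int)) : Prop := out = assess_complexity_indicators_py_alt code
instance (code : String) (out : List (String × Int)) : Decidable (Spec_assess_complexity_indicators_py code out) := by unfold Spec_assess_complexity_indicators_py; infer_instance

-- ===== CLAIM (what is proved, stated in full; the proofs are below) =====
def Claim_equal_assess_complexity_indicators_py : Prop := ∀ (code : String), Dom_assess_complexity_indicators_py code → Spec_assess_complexity_indicators_py code (assess_complexity_indicators_py code)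

-- ===== LEMMAS AND PROOFS =====

-- the literal 5-key dict A threads through its loop, as a function of the four mutable values
def mkD (a b c e : Int) : PySem.Dict String Int :=
  PySem.Dict.mk [("long_methods",a),("deep_nesting",b),("long_parameter_lists",c),
                 ("duplicate_code_smell",0),("large_classes",e)]

def nst (l : String) : Int :=
  PySem.Int.floordiv (PySem.Str.len l - PySem.Str.len (PySem.Str.lstrip l)) 4

def pIte (l : String) : Int :=
  if PySem.Str.isIn "def " l ∧ PySem.Str.count l "," > 5 then (1:Int) else 0

-- reference recursion: (#closed blocks over threshold, final running length), A's accumulator semantics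
def bRun (p : String → Bool) (thr : Int) : List String → Int → Int × Int
  | [], c => (0, c)
  | l :: ls, c =>
    if p l then
      ((if c > thr then 1 else 0) + (bRun p thr ls 0).1, (bRun p thr ls 0).2)
    else bRun p thr ls (if c ≥ 0 then c + 1 else c)

-- gap counter over boundary indices
def gCnt (thr : Int) : Int → List Int → Int → Int
  | prev, [], n => if n - prev - 1 > thr then 1 else 0
  | prev, i :: is, n => (if i - prev - 1 > thr then 1 else 0) + gCnt thr i is n

lemma nst_nonneg (l : String) : 0 ≤ nst l := by
  have hle : PySem.Str.len (PySem.Str.lstrip l) ≤ PySem.Str.len l := by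
    simp only [PySem.Str.len, PySem.Str.lstrip, PySem.Chars.lstrip]
    have h1 := List.length_dropWhile_le PySem.Chars.isspace l.toList
    have h2 : l.toList.length = l.length := String.length_toList (s := l)
    simp
    omega
  rw [nst, PySem.Int.floordiv_eq_ediv_of_pos (by omega)]
  exact Int.ediv_nonneg (by omega) (by omega)

lemma foldA (ls : List String) (a b c e cml ccl mxn : Int) :
    ls.foldl aStep (mkD a b c e, cml, ccl, mxn) =
      (mkD (a + (bRun bIsDef 50 ls cml).1) b (c + (ls.map pIte).sum)
           (e + (bRun bIsCls 300 ls ccl).1),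
       (bRun bIsDef 50 ls cml).2, (bRun bIsCls 300 ls ccl).2,
       ls.foldl (fun m l => max m (nst l)) mxn) := by
  induction ls generalizing a b c e cml ccl mxn with
  | nil => simp [bRun]
  | cons l t ih =>
    have hm : ∀ a b c e : Int, (mkD a b c e).modify "long_methods" 0 (· + 1) = mkD (a+1) b c e :=
      fun _ _ _ _ => rfl
    have hg : ∀ a b c e : Int, (mkD a b c e).modify "large_classes" 0 (· + 1) = mkD a b c (e+1) :=
      fun _ _ _ _ => rfl
    have hpp : ∀ a b c e : Int, (mkD a b c e).modify "long_parameter_lists" 0 (· + 1) = mkD a b (c+1) e :=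
      fun _ _ _ _ => rfl
    rw [List.foldl_cons]
    cases hd : PySem.Str.startswith (PySem.Str.strip l) "def " <;>
      cases hcl : PySem.Str.startswith (PySem.Str.strip l) "class " <;>
      by_cases hq : (PySem.Str.isIn "def " l ∧ PySem.Str.count l "," > 5) <;>
      simp only [aStep, hd, hcl, hq, Bool.false_eq_true, if_pos, if_neg,
        not_false_iff, List.foldl_cons, List.map_cons, List.sum_cons, bRun, bIsDef, bIsCls,
        pIte, List.foldl_cons] <;>
      split_ifs <;>
      (try simp only [hm, hg, hpp]) <;>
      rw [ih] <;>
      simp [mkD, Prod.ext_iff, nst] <;>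
      omega

lemma zipAdj (thr : Int) (idx : List Int) (prev n : Int) :
    (((prev :: (idx ++ [n])).zip (idx ++ [n])).map
      (fun p => if p.2 - p.1 - 1 > thr then (1:Int) else 0)).sum = gCnt thr prev idx n := by
  induction idx generalizing prev with
  | nil => simp [gCnt]
  | cons i is ih => simp [gCnt, ih i]

lemma gCnt_run (p : String → Bool) (thr : Int) (ls : List String) (k c : Int) (hc : 0 ≤ c) :
    gCnt thr (k - c - 1) (((PySem.List.enumerate ls k).filter (fun q => p q.2)).map (·.1))
        (k + ls.length) =
      (bRun p thr ls c).1 + (if (bRun p thr ls c).2 > thr then 1 else 0) := by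
  induction ls generalizing k c with
  | nil =>
    simp [PySem.List.enumerate_nil, gCnt, bRun]
    have h3 : k - (k - c - 1) - 1 = c := by ring
    rw [h3]
  | cons l t ih =>
    rw [PySem.List.enumerate_cons]
    cases hp : p l with
    | true =>
      have harg : k + (((l :: t).length : Nat) : Int) = (k + 1) + (t.length : Int) := by
        push_cast [List.length_cons]; ring
      have hk : (k + 1) - 0 - 1 = k := by ring
      simp only [List.filter_cons, hp, if_pos, List.map_cons, harg]
      rw [gCnt]
      have ih0 := ih (k + 1) 0 (le_refl 0)
      rw [hk] at ih0
      rw [ih0]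
      simp only [bRun, hp, if_pos]
      have hc' : k - (k - c - 1) - 1 = c := by ring
      rw [hc']
      ring
    | false =>
      have harg : k + (((l :: t).length : Nat) : Int) = (k + 1) + (t.length : Int) := by
        push_cast [List.length_cons]; ring
      have hprev : k - c - 1 = (k + 1) - (c + 1) - 1 := by ring
      simp only [List.filter_cons, hp, Bool.false_eq_true, if_false, harg]
      rw [hprev]
      rw [ih (k + 1) (c + 1) (by omega)]
      simp only [bRun, hp, Bool.false_eq_true, if_false]
      rw [if_pos hc]

lemma blockCount_eq (p : String → Bool) (thr : Int) (ls : List String) :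
    bBlockCount (((PySem.List.enumerate ls).filter (fun q => p q.2)).map (·.1)) ls.length thr =
      (bRun p thr ls 0).1 + (if (bRun p thr ls 0).2 > thr then 1 else 0) := by
  have h := gCnt_run p thr ls 0 0 (le_refl 0)
  norm_num at h
  simp only [bBlockCount, PySem.List.slice_from_one, List.cons_append, List.tail_cons]
  rw [zipAdj]
  exact h

lemma maxD_eq (ls : List String) :
    PySem.List.maxD (ls.map nst) (fun x => x) 0 = ls.foldl (fun m l => max m (nst l)) 0 := by
  cases ls with
  | nil => rfl
  | cons x t =>
    simp only [List.map_cons, PySem.List.maxD, PySem.List.max?_id_cons, Option.getD_some,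
      List.foldl_cons]
    rw [List.foldl_map]
    rw [max_eq_right (nst_nonneg x)]

-- ===== VERDICT (by name: the statement is the Claim_ definition above) =====
theorem assess_complexity_indicators_py_spec : Claim_equal_assess_complexity_indicators_py := by
  intro code _
  show _ = _
  unfold assess_complexity_indicators_py assess_complexity_indicators_py_alt
  have h0 : PySem.Dict.ofList
      [("long_methods", (0:Int)), ("deep_nesting", 0), ("long_parameter_lists", 0),
       ("duplicate_code_smell", 0), ("large_classes", 0)] = mkD 0 0 0 0 := rfl
  have hi : ∀ a b c e v : Int, (mkD a b c e).insert "deep_nesting" v = mkD a v c e :=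
    fun _ _ _ _ _ => rfl
  have hm : ∀ a b c e : Int, (mkD a b c e).modify "long_methods" 0 (· + 1) = mkD (a+1) b c e :=
    fun _ _ _ _ => rfl
  have hg : ∀ a b c e : Int, (mkD a b c e).modify "large_classes" 0 (· + 1) = mkD a b c (e+1) :=
    fun _ _ _ _ => rfl
  set ls := (PySem.Str.split? code "\n").getD [] with hls
  simp only [h0, foldA]
  simp only [show (fun l : String =>
        PySem.Int.floordiv (PySem.Str.len l - PySem.Str.len (PySem.Str.lstrip l)) 4) = nst
      from rfl,
    show (fun l : String =>
        if PySem.Str.isIn "def " l ∧ PySem.Str.count l "," > 5 then (1:Int) else 0) = pIte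
      from rfl,
    blockCount_eq bIsDef 50 ls, blockCount_eq bIsCls 300 ls, maxD_eq]
  simp only [zero_add]
  split_ifs with h1 h2 h3 h2 h3 h3 h3 <;>
    (try simp only [hm, hg, hi]) <;>
    simp [mkD]
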